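-- pv_equiv track=rewrite | github.com/Dnyarri/PixelArtScaling | IncScaleNx.py | Scale2x
-- ===== SOURCE A (Python) =====
-- def Scale2x(ImageAsListListList, X, Y):
--     """
--     Takes ImageAsListListList as 3D list (image) of lists (rows) of lists (pixels)
--     of int (channel values) of X, Y size (see InSrc.py for detail),
--     and performs Scale2x rescaling, returning (scaled image of similar structure, new X, new Y).
--
--     """
--
--     def processRow2(y):
--
--         RowRez = list()
--         RowDvo = list()
--
--         for x in range(0, X, 1):
--
--             P = ImageAsListListList[y][x]
--             A = ImageAsListListList[max(y - 1, 0)][x]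
--             B = ImageAsListListList[y][min(x + 1, X - 1)]
--             C = ImageAsListListList[y][max(x - 1, 0)]
--             D = ImageAsListListList[min(y + 1, Y - 1)][x]
--
--             r1 = P
--             r2 = P
--             r3 = P
--             r4 = P
--
--             if (C == A) and (C != D) and (A != B):
--                 r1 = A
--             if (A == B) and (A != C) and (B != D):
--                 r2 = B
--             if (D == C) and (D != B) and (C != A):
--                 r3 = C
--             if (B == D) and (B != A) and (D != C):
--                 r4 = D
--
--             RowRez.append(r1)
--             RowRez.append(r2)
--             RowDvo.append(r3)
--             RowDvo.append(r4)
--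
--         return (RowRez, RowDvo)
--
--     # end of row processing function
--
--     def addRow2(y):  # converting row processing into row insertion with no return
--
--         RowRez = processRow2(y)[0]
--         RowDvo = processRow2(y)[1]
--
--         EPXImage.append(RowRez)
--         EPXImage.append(RowDvo)
--
--         return None
--
--     # end of row insertion function
--
--     doubleX = 2 * X
--     doubleY = 2 * Y  # New list (image) size
--
--     EPXImage = list()
--
--     for y in range(0, Y, 1):
--
--         addRow2(y)
--
--     return (EPXImage, doubleX, doubleY)
-- ===== SOURCE B (Python) =====
-- def Scale2x(ImageAsListListList, X, Y):
--     """Scale2x, iterating over OUTPUT pixels: each output pixel (oy, ox) is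
--     computed directly from source pixel (oy//2, ox//2) and its clamped
--     neighbours, selecting by output-coordinate parity."""
--     out = []
--     for oy in range(2 * Y):
--         y = oy // 2
--         row = []
--         for ox in range(2 * X):
--             x = ox // 2
--             P = ImageAsListListList[y][x]
--             A = ImageAsListListList[max(y - 1, 0)][x]
--             B = ImageAsListListList[y][min(x + 1, X - 1)]
--             C = ImageAsListListList[y][max(x - 1, 0)]
--             D = ImageAsListListList[min(y + 1, Y - 1)][x]
--             if oy % 2 == 0:
--                 if ox % 2 == 0:
--                     v = A if (C == A and C != D and A != B) else P
--                 else: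
--                     v = B if (A == B and A != C and B != D) else P
--             else:
--                 if ox % 2 == 0:
--                     v = C if (D == C and D != B and C != A) else P
--                 else:
--                     v = D if (B == D and B != A and D != C) else P
--             row.append(v)
--         out.append(row)
--     return (out, 2 * X, 2 * Y)
-- ===== Notes on version B (the rewrite author's own statement) =====
-- stated objective: alternative
-- what changed: B traverses the output image (one pass over 2Y*2X output pixels, each computed from its source pixel oy//2, ox//2 by parity selection) instead of A's per-source-pixel emission of 2x2 blocks into two parallel row buffers; A's nested helper functions and double processRow2 call per row disappear.
import Mathlib
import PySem

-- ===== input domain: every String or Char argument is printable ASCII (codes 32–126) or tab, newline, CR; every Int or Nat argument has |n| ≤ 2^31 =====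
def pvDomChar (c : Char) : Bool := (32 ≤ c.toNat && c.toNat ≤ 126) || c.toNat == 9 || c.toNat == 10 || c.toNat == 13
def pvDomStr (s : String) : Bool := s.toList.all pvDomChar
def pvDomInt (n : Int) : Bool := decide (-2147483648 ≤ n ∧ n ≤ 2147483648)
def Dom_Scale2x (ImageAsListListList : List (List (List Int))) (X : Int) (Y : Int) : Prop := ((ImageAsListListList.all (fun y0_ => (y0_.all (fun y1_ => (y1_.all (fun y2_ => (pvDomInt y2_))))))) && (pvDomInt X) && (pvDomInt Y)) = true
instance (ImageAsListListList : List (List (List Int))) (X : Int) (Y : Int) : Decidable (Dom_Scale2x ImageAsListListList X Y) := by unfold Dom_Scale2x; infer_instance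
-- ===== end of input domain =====

-- B re-decomposes Scale2x as one pass over output pixels (value chosen by output parity from source pixel oy//2, ox//2) instead of A's per-source-pixel emission of 2x2 blocks into two row buffers; same cost, different traversal.

-- ===== PORT A =====
-- shared helper: ImageAsListListList[y][x] (indices are in range under Pre_; default [] is never reached there)
def pixAt (img : List (List (List Int))) (y x : Int) : List Int :=
  PySem.List.pyGetD (PySem.List.pyGetD img y []) x []

def Scale2x (ImageAsListListList : List (List (List Int))) (X : Int) (Y : Int) : List (List (List Int)) × Int × Int :=
  let processRow2 : Int → List (List Int) × List (List Int) := fun y =>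
    (PySem.List.pyRange 0 X 1).foldl (fun st x =>
      let P := pixAt ImageAsListListList y x
      let A := pixAt ImageAsListListList (max (y - 1) 0) x
      let B := pixAt ImageAsListListList y (min (x + 1) (X - 1))
      let C := pixAt ImageAsListListList y (max (x - 1) 0)
      let D := pixAt ImageAsListListList (min (y + 1) (Y - 1)) x
      let r1 := if C = A ∧ C ≠ D ∧ A ≠ B then A else P
      let r2 := if A = B ∧ A ≠ C ∧ B ≠ D then B else P
      let r3 := if D = C ∧ D ≠ B ∧ C ≠ A then C else P
      let r4 := if B = D ∧ B ≠ A ∧ D ≠ C then D else P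
      (st.1 ++ [r1, r2], st.2 ++ [r3, r4])) ([], [])
  let doubleX := 2 * X
  let doubleY := 2 * Y
  let EPXImage := (PySem.List.pyRange 0 Y 1).foldl (fun acc y =>
      let RowRez := (processRow2 y).1
      let RowDvo := (processRow2 y).2
      acc ++ [RowRez, RowDvo]) []
  (EPXImage, doubleX, doubleY)

-- ===== PORT B =====
def Scale2x_alt (ImageAsListListList : List (List (List Int))) (X : Int) (Y : Int) : List (List (List Int)) × Int × Int :=
  let out := (PySem.List.pyRange 0 (2 * Y) 1).foldl (fun acc oy =>
    let y := PySem.Int.floordiv oy 2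
    let row := (PySem.List.pyRange 0 (2 * X) 1).foldl (fun racc ox =>
      let x := PySem.Int.floordiv ox 2
      let P := pixAt ImageAsListListList y x
      let A := pixAt ImageAsListListList (max (y - 1) 0) x
      let B := pixAt ImageAsListListList y (min (x + 1) (X - 1))
      let C := pixAt ImageAsListListList y (max (x - 1) 0)
      let D := pixAt ImageAsListListList (min (y + 1) (Y - 1)) x
      let v := if PySem.Int.mod oy 2 = 0 then
                 if PySem.Int.mod ox 2 = 0 then (if C = A ∧ C ≠ D ∧ A ≠ B then A else P)
                 else (if A = B ∧ A ≠ C ∧ B ≠ D then B else P)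
               else
                 if PySem.Int.mod ox 2 = 0 then (if D = C ∧ D ≠ B ∧ C ≠ A then C else P)
                 else (if B = D ∧ B ≠ A ∧ D ≠ C then D else P)
      racc ++ [v]) []
    acc ++ [row]) []
  (out, 2 * X, 2 * Y)

-- ===== PRECONDITION & SPEC =====
-- Pre_ excludes exactly the inputs where Python A raises IndexError: with X > 0 and Y > 0 the
-- image must have at least Y rows and each of the first Y rows at least X pixels.
def Pre_Scale2x (ImageAsListListList : List (List (List Int))) (X : Int) (Y : Int) : Prop :=
  0 < X → 0 < Y → (Y ≤ (ImageAsListListList.length : Int) ∧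
    ∀ r ∈ ImageAsListListList.take Y.toNat, X ≤ (r.length : Int))
instance (ImageAsListListList : List (List (List Int))) (X : Int) (Y : Int) : Decidable (Pre_Scale2x ImageAsListListList X Y) := by unfold Pre_Scale2x; infer_instance
def pvWitness_Scale2x : List (List (List Int)) × Int × Int := ([[[1], [2]], [[3], [4]]], 2, 2)

def Spec_Scale2x (ImageAsListListList : List (List (List Int))) (X : Int) (Y : Int) (out : List (List (List Int)) × Int × Int) : Prop := out = Scale2x_alt ImageAsListListList X Y
instance (ImageAsListListList : List (List (List Int))) (X : Int) (Y : Int) (out : List (List (List Int)) × Int × Int) : Decidable (Spec_Scale2x ImageAsListListList X Y out) := by unfold Spec_Scale2x; infer_instance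

-- ===== CLAIM (what is proved, stated in full; the proofs are below) =====
def Claim_equal_Scale2x : Prop := ∀ (ImageAsListListList : List (List (List Int))) (X : Int) (Y : Int), Dom_Scale2x ImageAsListListList X Y → Pre_Scale2x ImageAsListListList X Y → Spec_Scale2x ImageAsListListList X Y (Scale2x ImageAsListListList X Y)

-- ===== LEMMAS AND PROOFS =====

-- a foldl that appends to BOTH components of a pair is a pair of flatMaps
theorem foldl_pair_append {α : Type} (l : List Int) (f g : Int → List α) (a b : List α) :
    l.foldl (fun st x => (st.1 ++ f x, st.2 ++ g x)) (a, b) = (a ++ l.flatMap f, b ++ l.flatMap g) := by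
  induction l generalizing a b with
  | nil => simp
  | cons h t ih => simp [ih]

-- range(0, 2n) is range(0, n) with every k replaced by 2k, 2k+1
theorem pyRange_double_nat (m : Nat) :
    PySem.List.pyRange 0 (2 * (m : Int)) 1 = (PySem.List.pyRange 0 (m : Int) 1).flatMap (fun k => [2 * k, 2 * k + 1]) := by
  induction m with
  | zero => simp [PySem.List.pyRange_one_eq_nil]
  | succ n ih =>
    have h1 : (2 * ((n : Int) + 1)) = (2 * (n : Int) + 1) + 1 := by ring
    push_cast
    rw [h1, PySem.List.pyRange_one_succ_right (by positivity),
        PySem.List.pyRange_one_succ_right (by positivity),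
        PySem.List.pyRange_one_succ_right (by positivity)]
    push_cast at ih
    simp [ih]

theorem pyRange_double (n : Int) :
    PySem.List.pyRange 0 (2 * n) 1 = (PySem.List.pyRange 0 n 1).flatMap (fun k => [2 * k, 2 * k + 1]) := by
  by_cases h : n ≤ 0
  · rw [PySem.List.pyRange_one_eq_nil (by omega), PySem.List.pyRange_one_eq_nil (by omega)]
    simp
  · have : n = (n.toNat : Int) := by omega
    rw [this]; exact pyRange_double_nat n.toNat

theorem ediv_two_mul_add_one (k : Int) : (2 * k + 1) / 2 = k := by omega

-- ===== VERDICT (by name: the statement is the Claim_ definition above) =====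
theorem Scale2x_spec : Claim_equal_Scale2x := by
  intro img X Y _ _
  unfold Spec_Scale2x Scale2x Scale2x_alt
  refine Prod.ext ?_ rfl
  simp only
  rw [PySem.List.foldl_append_eq_flatMap, PySem.List.foldl_append_singleton_eq_map,
      pyRange_double Y, List.map_flatMap]
  simp only [List.nil_append]
  apply List.flatMap_congr
  intro y _
  rw [foldl_pair_append]
  simp only [List.nil_append, List.map_cons, List.map_nil]
  rw [PySem.List.foldl_append_singleton_eq_map, PySem.List.foldl_append_singleton_eq_map,
      pyRange_double X, List.map_flatMap, List.map_flatMap]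
  simp only [List.nil_append]
  congr 1
  · apply List.flatMap_congr
    intro x _
    simp [ediv_two_mul_add_one]
  · congr 1
    apply List.flatMap_congr
    intro x _
    simp [ediv_two_mul_add_one]
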